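-- pv_equiv track=rewrite | github.com/isabert/programming_questions_binarysearch.com | Q969_ASCII_String_To_Integer.py | solve
-- ===== SOURCE A (Python) =====
-- def solve(s):
--     res = 0
--     temp = 0
--     for c in s:
--         if(ord(c)-ord("0")>=0 and ord(c)-ord("0")<=9):
--             res-=temp
--             temp=temp*10+ord(c)-ord("0")
--             res+=temp
--         else:
--             temp=0
--     return res
-- ===== SOURCE B (Python) =====
-- def solve(s):
--     n = len(s)
--     total = 0
--     i = 0
--     while i < n:
--         if '0' <= s[i] <= '9':
--             j = i
--             v = 0
--             while j < n and '0' <= s[j] <= '9':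
--                 v = 10 * v + (ord(s[j]) - 48)
--                 j += 1
--             total += v
--             i = j
--         else:
--             i += 1
--     return total
-- ===== Notes on version B (the rewrite author's own statement) =====
-- stated objective: alternative
-- what changed: Replaces A's single-pass res/temp subtract-and-readd accumulator with a tokenize-then-sum scan: an outer loop finds each maximal digit run, an inner loop converts that run to its value, and the total is bumped once per run.
import Mathlib
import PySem

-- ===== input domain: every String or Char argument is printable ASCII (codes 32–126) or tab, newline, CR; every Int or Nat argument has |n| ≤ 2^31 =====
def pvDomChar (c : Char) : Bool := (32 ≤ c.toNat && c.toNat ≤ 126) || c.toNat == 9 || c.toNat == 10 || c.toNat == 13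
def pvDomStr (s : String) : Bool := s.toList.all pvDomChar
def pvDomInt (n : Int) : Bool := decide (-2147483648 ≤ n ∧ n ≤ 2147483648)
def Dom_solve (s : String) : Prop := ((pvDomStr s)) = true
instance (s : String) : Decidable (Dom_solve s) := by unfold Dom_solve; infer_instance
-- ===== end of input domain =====

-- B replaces A's single-pass res/temp subtract-and-readd accumulator with a tokenize-then-sum
-- scan (outer loop per maximal digit run, inner loop converting the run to its value); same cost.


-- ===== PORT A =====
-- one loop iteration: if ord(c)-48 in [0,9]: res-=temp; temp=temp*10+d; res+=temp else temp=0
def solveStep (p : Int × Int) (c : Char) : Int × Int :=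
  let d : Int := (c.toNat : Int) - 48
  if 0 ≤ d ∧ d ≤ 9 then (p.1 - p.2 + (p.2 * 10 + d), p.2 * 10 + d) else (p.1, 0)

def solve (s : String) : Int :=
  (s.toList.foldl solveStep (0, 0)).1

-- ===== PORT B =====
-- '0' <= c <= '9' (chars compare by code point, so this numeric form is exact)
def isDig (c : Char) : Bool := 48 ≤ c.toNat && c.toNat ≤ 57

-- inner while loop: while j < n and '0' <= s[j] <= '9': v = 10*v + (ord(s[j]) - 48); j += 1
-- (s[j] is in range under the j < n guard, so List.getD is exact; fuel ≥ n - j only bounds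
-- the iteration count, it is never the reason the loop stops)
def solveAltRun (cs : List Char) (n : Nat) (fuel j : Nat) (v : Int) : Nat × Int :=
  match fuel with
  | 0 => (j, v)
  | fuel + 1 =>
    if j < n ∧ isDig (cs.getD j ' ') then
      solveAltRun cs n fuel (j + 1) (10 * v + (((cs.getD j ' ').toNat : Int) - 48))
    else (j, v)

-- outer while loop over i; total += v once per digit run (fuel ≥ n - i, same remark)
def solveAltGo (cs : List Char) (n : Nat) (fuel i : Nat) (total : Int) : Int :=
  match fuel with
  | 0 => total
  | fuel + 1 =>
    if i < n then
      if isDig (cs.getD i ' ') then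
        let r := solveAltRun cs n (n - i) i 0
        solveAltGo cs n fuel r.1 (total + r.2)
      else solveAltGo cs n fuel (i + 1) total
    else total

def solve_alt (s : String) : Int :=
  let cs := s.toList
  let n := cs.length
  solveAltGo cs n n 0 0

-- ===== PRECONDITION & SPEC =====
def Spec_solve (s : String) (out : Int) : Prop := out = solve_alt s
instance (s : String) (out : Int) : Decidable (Spec_solve s out) := by unfold Spec_solve; infer_instance

-- ===== CLAIM (what is proved, stated in full; the proofs are below) =====
def Claim_equal_solve : Prop := ∀ (s : String), Dom_solve s → Spec_solve s (solve s)

-- ===== LEMMAS AND PROOFS =====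

-- reference semantics: W temp cs = value of the run currently worth temp, extended through cs,
-- plus the values of all later runs
def W (temp : Int) : List Char → Int
  | [] => temp
  | c :: r => if isDig c then W (temp * 10 + ((c.toNat : Int) - 48)) r else temp + W 0 r

theorem cond_iff (c : Char) :
    (0 ≤ (c.toNat : Int) - 48 ∧ (c.toNat : Int) - 48 ≤ 9) ↔ isDig c = true := by
  simp only [isDig, Bool.and_eq_true, decide_eq_true_eq]; omega

theorem W_cons (t : Int) (c : Char) (r : List Char) :
    W t (c :: r) = if isDig c then W (t * 10 + ((c.toNat : Int) - 48)) r else t + W 0 r := rfl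

theorem foldlA (cs : List Char) : ∀ res temp : Int,
    (cs.foldl solveStep (res, temp)).1 = res - temp + W temp cs := by
  induction cs with
  | nil => intro res temp; simp [W]
  | cons c r ih =>
    intro res temp
    simp only [List.foldl_cons, solveStep]
    split_ifs with h
    · have hd : isDig c = true := (cond_iff c).mp h
      rw [ih, W_cons, if_pos hd]; ring
    · have hd : ¬ isDig c = true := fun hh => h ((cond_iff c).mpr hh)
      rw [ih, W_cons, if_neg hd]; ring

theorem run_fst_ge (cs : List Char) (n : Nat) :
    ∀ fuel j v, j ≤ (solveAltRun cs n fuel j v).1 := by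
  intro fuel
  induction fuel with
  | zero => intro j v; simp [solveAltRun]
  | succ fuel ih =>
    intro j v
    rw [solveAltRun]
    split_ifs with h
    · exact le_trans (by omega) (ih (j + 1) _)
    · simp

theorem run_fst_le (cs : List Char) (n : Nat) :
    ∀ fuel j v, j ≤ n → (solveAltRun cs n fuel j v).1 ≤ n := by
  intro fuel
  induction fuel with
  | zero => intro j v hj; simpa [solveAltRun] using hj
  | succ fuel ih =>
    intro j v hj
    rw [solveAltRun]
    split_ifs with h
    · exact ih (j + 1) _ (by omega)
    · simpa using hj

theorem runW (cs : List Char) (n : Nat) :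
    ∀ fuel j v, n = cs.length → j ≤ n → n - j ≤ fuel →
    W v (cs.drop j) = (solveAltRun cs n fuel j v).2 + W 0 (cs.drop (solveAltRun cs n fuel j v).1) := by
  intro fuel
  induction fuel with
  | zero =>
    intro j v hn hj hf
    have hje : j = cs.length := by omega
    rw [hje, List.drop_length]
    simp [solveAltRun, W]
  | succ fuel ih =>
    intro j v hn hj hf
    rw [solveAltRun]
    split_ifs with h
    · obtain ⟨hjn, hd⟩ := h
      have hjl : j < cs.length := by omega
      have hget : cs.getD j ' ' = cs[j] := List.getD_eq_getElem cs ' ' hjl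
      rw [List.drop_eq_getElem_cons hjl, ← hget]
      rw [W_cons, if_pos hd]
      have harith : v * 10 + (((cs.getD j ' ').toNat : Int) - 48)
          = 10 * v + (((cs.getD j ' ').toNat : Int) - 48) := by ring
      rw [harith]
      exact ih (j + 1) _ hn (by omega) (by omega)
    · by_cases hjn : j < n
      · have hd : ¬ isDig (cs.getD j ' ') = true := fun hh => h ⟨hjn, hh⟩
        have hjl : j < cs.length := by omega
        have hget : cs.getD j ' ' = cs[j] := List.getD_eq_getElem cs ' ' hjl
        rw [List.drop_eq_getElem_cons hjl, ← hget]
        simp only [W_cons, if_neg hd]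
        ring
      · have hje : j = cs.length := by omega
        rw [hje, List.drop_length]
        simp [W]

theorem goW (cs : List Char) (n : Nat) :
    ∀ fuel i total, n = cs.length → i ≤ n → n - i ≤ fuel →
    solveAltGo cs n fuel i total = total + W 0 (cs.drop i) := by
  intro fuel
  induction fuel with
  | zero =>
    intro i total hn hi hf
    have hie : i = cs.length := by omega
    rw [hie, List.drop_length]
    simp [solveAltGo, W]
  | succ fuel ih =>
    intro i total hn hi hf
    rw [solveAltGo]
    split_ifs with h hd
    · -- digit at i: one full run, then continue after it
      show solveAltGo cs n fuel (solveAltRun cs n (n - i) i 0).1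
          (total + (solveAltRun cs n (n - i) i 0).2) = total + W 0 (cs.drop i)
      have hfst_ge : i + 1 ≤ (solveAltRun cs n (n - i) i 0).1 := by
        obtain ⟨k, hk⟩ : ∃ k, n - i = k + 1 := ⟨n - i - 1, by omega⟩
        rw [hk, solveAltRun, if_pos ⟨h, hd⟩]
        exact run_fst_ge cs n k (i + 1) _
      have hfst_le : (solveAltRun cs n (n - i) i 0).1 ≤ n :=
        run_fst_le cs n (n - i) i 0 (by omega)
      rw [ih _ _ hn hfst_le (by omega)]
      rw [runW cs n (n - i) i 0 hn (by omega) (by omega)]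
      ring
    · -- non-digit at i: skip one character
      rw [ih _ _ hn (by omega) (by omega)]
      have hjl : i < cs.length := by omega
      have hget : cs.getD i ' ' = cs[i] := List.getD_eq_getElem cs ' ' hjl
      rw [List.drop_eq_getElem_cons hjl, ← hget]
      simp only [W_cons, if_neg hd]
      ring
    · have hie : i = cs.length := by omega
      rw [hie, List.drop_length]
      simp [W]

-- ===== VERDICT (by name: the statement is the Claim_ definition above) =====
theorem solve_spec : Claim_equal_solve := by
  intro s _
  show solve s = solve_alt s
  unfold solve solve_alt
  rw [foldlA, goW s.toList s.toList.length s.toList.length 0 0 rfl (by omega) (by omega)]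
  simp
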